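-- pv_equiv track=rewrite | github.com/NoCream-jp/atcoder-submissions | ABC455/B.py | check
-- ===== SOURCE A (Python) =====
-- def check(grid, i, j, ii, jj):
--     h = ii - i + 1
--     for tate in range(i, i+(h + 1)//2):
--         for yoko in range(j, jj+1):
--             ni = i + ii - tate
--             nj = j + jj - yoko
--             if tate == ni and yoko == nj:
--                 continue
--             if tate > ni or (tate == ni and yoko > nj):
--                 break
--             if grid[tate][yoko] != grid[ni][nj]:
--                 return False
--     return True
-- ===== SOURCE B (Python) =====
-- def check(grid, i, j, ii, jj):
--     cells = [grid[r][c] for r in range(i, ii + 1) for c in range(j, jj + 1)]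
--     return cells == cells[::-1]
-- ===== Notes on version B (the rewrite author's own statement) =====
-- stated objective: simpler
-- what changed: B materializes the subgrid's cells as one row-major list and tests 180-degree symmetry as 'the list equals its reversal', replacing A's nested index loops with break/continue center-and-midpoint bookkeeping by a build-then-compare over the whole block.
-- outside the precondition, e.g. on check([['a'], ['x', 'y']], 0, 0, 1, 1): A returns False, B raises IndexError; on check([['a'], [], ['a']], 0, 0, 2, 0): A returns True, B raises IndexError
import Mathlib
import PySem

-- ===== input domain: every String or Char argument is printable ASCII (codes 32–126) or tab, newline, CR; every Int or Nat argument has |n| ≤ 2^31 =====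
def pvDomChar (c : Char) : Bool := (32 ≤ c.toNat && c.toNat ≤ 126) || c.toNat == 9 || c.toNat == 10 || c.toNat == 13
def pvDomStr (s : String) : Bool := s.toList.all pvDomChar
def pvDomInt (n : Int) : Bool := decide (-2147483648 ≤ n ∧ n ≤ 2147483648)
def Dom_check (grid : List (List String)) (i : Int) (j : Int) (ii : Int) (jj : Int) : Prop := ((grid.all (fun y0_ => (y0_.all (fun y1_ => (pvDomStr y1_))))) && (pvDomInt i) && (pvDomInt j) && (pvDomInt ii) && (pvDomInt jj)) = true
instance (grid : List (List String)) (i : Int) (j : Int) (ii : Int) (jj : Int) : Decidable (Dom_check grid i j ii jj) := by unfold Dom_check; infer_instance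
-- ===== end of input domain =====

-- B materializes the block's cells as one row-major list and tests 180° symmetry as 'the list
-- equals its reversal' (build-then-compare; simpler decomposition, same cost as A's index loops).

-- ===== PORT A =====
-- grid[r][c] with Python indexing (negative wraps, out of range = IndexError = none); shared accessor
def pvCell (grid : List (List String)) (r c : Int) : Option String :=
  (PySem.List.pyGet? grid r).bind (fun row => PySem.List.pyGet? row c)

-- inner 'for yoko in range(j, jj+1)': some b = 'return b' from check, none = loop finished or broke
def pvInnerA (grid : List (List String)) (i j ii jj tate : Int) : List Int → Option Bool
  | [] => none
  | yoko :: rest =>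
    let ni := i + ii - tate
    let nj := j + jj - yoko
    if tate = ni ∧ yoko = nj then pvInnerA grid i j ii jj tate rest
    else if tate > ni ∨ (tate = ni ∧ yoko > nj) then none
    else
      match pvCell grid tate yoko, pvCell grid ni nj with
      | some x, some y => if x ≠ y then some false else pvInnerA grid i j ii jj tate rest
      | _, _ => some false   -- Python raises IndexError here; such inputs are outside Pre_check

-- outer 'for tate in range(i, i+(h+1)//2)'
def pvOuterA (grid : List (List String)) (i j ii jj : Int) : List Int → Bool
  | [] => true
  | tate :: rest =>
    match pvInnerA grid i j ii jj tate (PySem.List.pyRange j (jj + 1) 1) with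
    | some b => b
    | none => pvOuterA grid i j ii jj rest

def check (grid : List (List String)) (i : Int) (j : Int) (ii : Int) (jj : Int) : Bool :=
  let h := ii - i + 1
  pvOuterA grid i j ii jj (PySem.List.pyRange i (i + PySem.Int.floordiv (h + 1) 2) 1)

-- ===== PORT B =====
-- cells = [grid[r][c] for r in range(i, ii+1) for c in range(j, jj+1)]
-- (an out-of-range cell is none = Python's IndexError; such inputs are outside Pre_check)
def pvCells (grid : List (List String)) (i j ii jj : Int) : List (Option String) :=
  (PySem.List.pyRange i (ii + 1) 1).flatMap (fun r =>
    (PySem.List.pyRange j (jj + 1) 1).map (fun c => pvCell grid r c))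

-- return cells == cells[::-1]
def check_alt (grid : List (List String)) (i : Int) (j : Int) (ii : Int) (jj : Int) : Bool :=
  let cells := pvCells grid i j ii jj
  cells == (PySem.List.slice? cells none none (-1)).getD []

-- ===== PRECONDITION & SPEC =====
-- Pre_check excludes exactly the inputs where some cell of the i..ii × j..jj block is out of range
-- under Python indexing: on almost all of those A raises IndexError; on some ragged grids A instead
-- returns before touching the bad cell, while B reads every cell of the block and raises there.
-- the block is in range iff its extreme row/column indices are (Python indexing: -len ≤ idx < len)
def pvPreB (grid : List (List String)) (i j ii jj : Int) : Bool :=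
  if i ≤ ii ∧ j ≤ jj then
    decide (-(grid.length : Int) ≤ i) && decide (ii < (grid.length : Int)) &&
    (PySem.List.pyRange i (ii + 1) 1).all (fun r =>
      match PySem.List.pyGet? grid r with
      | some row => decide (-(row.length : Int) ≤ j) && decide (jj < (row.length : Int))
      | none => false)
  else true

def Pre_check (grid : List (List String)) (i : Int) (j : Int) (ii : Int) (jj : Int) : Prop :=
  pvPreB grid i j ii jj = true
instance (grid : List (List String)) (i : Int) (j : Int) (ii : Int) (jj : Int) : Decidable (Pre_check grid i j ii jj) := by unfold Pre_check; infer_instance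

def pvWitness_check : List (List String) × Int × Int × Int × Int := ([["a", "b"], ["b", "a"]], 0, 0, 1, 1)

def Spec_check (grid : List (List String)) (i : Int) (j : Int) (ii : Int) (jj : Int) (out : Bool) : Prop := out = check_alt grid i j ii jj
instance (grid : List (List String)) (i : Int) (j : Int) (ii : Int) (jj : Int) (out : Bool) : Decidable (Spec_check grid i j ii jj out) := by unfold Spec_check; infer_instance

-- ===== CLAIM (what is proved, stated in full; the proofs are below) =====
def Claim_equal_check : Prop := ∀ (grid : List (List String)) (i : Int) (j : Int) (ii : Int) (jj : Int), Dom_check grid i j ii jj → Pre_check grid i j ii jj → Spec_check grid i j ii jj (check grid i j ii jj)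

-- ===== LEMMAS AND PROOFS =====

-- the flat-index view of one block cell, used only by the proofs
def pvF (grid : List (List String)) (i j jj : Int) (k : Int) : Option String :=
  pvCell grid (i + k / (jj - j + 1)) (j + k % (jj - j + 1))

-- 2 * (p // 2) brackets p
theorem pvHalf (p : Int) : 2 * PySem.Int.floordiv p 2 ≤ p ∧ p ≤ 2 * PySem.Int.floordiv p 2 + 1 := by
  rw [PySem.Int.floordiv_eq_ediv_of_pos (by norm_num)]
  have h1 := Int.mul_ediv_add_emod p 2
  have h2 := Int.emod_nonneg p (by norm_num : (2:Int) ≠ 0)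
  have h3 := Int.emod_lt_of_pos p (by norm_num : (0:Int) < 2)
  omega

-- divmod of c + r*w recovers (r, c)
theorem pvDivmodOf (w r c : Int) (hw : 0 < w) (hc0 : 0 ≤ c) (hcw : c < w) :
    (c + r * w) / w = r ∧ (c + r * w) % w = c := by
  constructor
  · rw [Int.add_mul_ediv_right _ _ (by omega : w ≠ 0), Int.ediv_eq_zero_of_lt hc0 hcw]; ring
  · rw [show c + r * w = c + w * r by ring, Int.add_mul_emod_self_left,
        Int.emod_eq_of_lt hc0 hcw]

-- bounds of (r, c) = divmod(k, w) for k in the first half of an h × w block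
theorem pvKBounds (h w M k : Int) (_hh : 1 ≤ h) (hw : 1 ≤ w) (hM2 : 2 * M ≤ h * w)
    (hk0 : 0 ≤ k) (hkM : k < M) :
    0 ≤ k / w ∧ 2 * (k / w) ≤ h - 1 ∧ 0 ≤ k % w ∧ k % w < w ∧
      (2 * (k / w) = h - 1 → 2 * (k % w) ≤ w - 2) := by
  have hd := Int.mul_ediv_add_emod k w
  have hc0 := Int.emod_nonneg k (by omega : w ≠ 0)
  have hcw := Int.emod_lt_of_pos k (by omega : 0 < w)
  have hr0 : 0 ≤ k / w := Int.ediv_nonneg hk0 (by omega)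
  have hru : 2 * (k / w) ≤ h - 1 := by
    by_contra hcon
    have h1 : h ≤ 2 * (k / w) := by omega
    have h2 : w * h ≤ w * (2 * (k / w)) := mul_le_mul_of_nonneg_left h1 (by omega)
    have h3 : w * (2 * (k / w)) = 2 * (w * (k / w)) := by ring
    have h4 : w * h = h * w := by ring
    linarith
  refine ⟨hr0, hru, hc0, hcw, ?_⟩
  intro hmid
  have h2 : w * (2 * (k / w)) = w * (h - 1) := by rw [hmid]
  have h3 : w * (2 * (k / w)) = 2 * (w * (k / w)) := by ring
  have h4 : w * (h - 1) = h * w - w := by ring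
  linarith

-- k = r*w + c lies in the first half of an h × w block
theorem pvKUp (h w M r c : Int) (_hw : 1 ≤ w) (hM1 : h * w ≤ 2 * M + 1)
    (_hr0 : 0 ≤ r) (_hc0 : 0 ≤ c) (hcw : c < w)
    (hcase : 2 * r ≤ h - 2 ∨ (2 * r = h - 1 ∧ 2 * c ≤ w - 2)) : r * w + c < M := by
  rcases hcase with hc | ⟨hr, hc⟩
  · have h1 : (2 * r) * w ≤ (h - 2) * w := mul_le_mul_of_nonneg_right hc (by omega)
    have h2 : (2 * r) * w = 2 * (r * w) := by ring
    have h3 : (h - 2) * w = h * w - 2 * w := by ring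
    linarith
  · have h1 : (2 * r) * w = (h - 1) * w := by rw [hr]
    have h2 : (2 * r) * w = 2 * (r * w) := by ring
    have h3 : (h - 1) * w = h * w - w := by ring
    linarith

-- empty column range: the inner loop never runs, so the outer loop returns True whatever its row list
theorem pvOuterA_empty_cols (grid : List (List String)) (i j ii jj : Int) (hwj : jj + 1 ≤ j) :
    ∀ l : List Int, pvOuterA grid i j ii jj l = true := by
  intro l
  induction l with
  | nil => rfl
  | cons t rest ih =>
      simp [pvOuterA, PySem.List.pyRange_one_eq_nil hwj, pvInnerA, ih]

-- A's inner loop on a non-middle row (tate strictly above its mirror row) compares every column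
theorem pvInnerA_row (grid : List (List String)) (i j ii jj tate : Int)
    (hmid : 2 * tate < i + ii)
    (hsome : ∀ c, j ≤ c → c ≤ jj → (pvCell grid tate c).isSome = true ∧ (pvCell grid (i + ii - tate) c).isSome = true) :
    ∀ y0, j ≤ y0 →
    pvInnerA grid i j ii jj tate (PySem.List.pyRange y0 (jj + 1) 1)
      = if (PySem.List.pyRange y0 (jj + 1) 1).all
            (fun y => decide (pvCell grid tate y = pvCell grid (i + ii - tate) (j + jj - y)))
        then none else some false := by
  have main : ∀ n : Nat, ∀ y0 : Int, j ≤ y0 → (jj + 1 - y0).toNat = n →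
      pvInnerA grid i j ii jj tate (PySem.List.pyRange y0 (jj + 1) 1)
        = if (PySem.List.pyRange y0 (jj + 1) 1).all
              (fun y => decide (pvCell grid tate y = pvCell grid (i + ii - tate) (j + jj - y)))
          then none else some false := by
    intro n
    induction n with
    | zero =>
        intro y0 _ h0
        rw [PySem.List.pyRange_one_eq_nil (by omega)]
        rfl
    | succ n ihn =>
        intro y0 hy0 hn
        have hle : y0 ≤ jj := by omega
        rw [PySem.List.pyRange_one_cons (by omega)]
        obtain ⟨x, hx⟩ := Option.isSome_iff_exists.mp ((hsome y0 hy0 hle).1)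
        obtain ⟨y, hy⟩ := Option.isSome_iff_exists.mp
          ((hsome (j + jj - y0) (by omega) (by omega)).2)
        simp only [pvInnerA, hx, hy, List.all_cons]
        rw [if_neg (by omega), if_neg (by omega)]
        have ih' := ihn (y0 + 1) (by omega) (by omega)
        by_cases hxy : x = y
        · subst hxy
          simp [ih']
        · simp [hxy]
  exact fun y0 hy0 => main (jj + 1 - y0).toNat y0 hy0 rfl

-- A's inner loop on the middle row compares exactly the first w//2 columns
theorem pvInnerA_mid (grid : List (List String)) (i j ii jj tate : Int)
    (hmid : 2 * tate = i + ii)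
    (hsome : ∀ c, j ≤ c → c ≤ jj → (pvCell grid tate c).isSome = true) :
    ∀ y0, j ≤ y0 →
    pvInnerA grid i j ii jj tate (PySem.List.pyRange y0 (jj + 1) 1)
      = if (PySem.List.pyRange y0 (j + PySem.Int.floordiv (jj - j + 1) 2) 1).all
            (fun y => decide (pvCell grid tate y = pvCell grid (i + ii - tate) (j + jj - y)))
        then none else some false := by
  have hm := pvHalf (jj - j + 1)
  have main : ∀ n : Nat, ∀ y0 : Int, j ≤ y0 → (jj + 1 - y0).toNat = n →
      pvInnerA grid i j ii jj tate (PySem.List.pyRange y0 (jj + 1) 1)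
        = if (PySem.List.pyRange y0 (j + PySem.Int.floordiv (jj - j + 1) 2) 1).all
              (fun y => decide (pvCell grid tate y = pvCell grid (i + ii - tate) (j + jj - y)))
          then none else some false := by
    intro n
    induction n with
    | zero =>
        intro y0 _ h0
        rw [PySem.List.pyRange_one_eq_nil (by omega), PySem.List.pyRange_one_eq_nil (by omega)]
        rfl
    | succ n ihn =>
        intro y0 hy0 hn
        have hle : y0 ≤ jj := by omega
        rw [PySem.List.pyRange_one_cons (by omega)]
        have ih' := ihn (y0 + 1) (by omega) (by omega)
        rcases lt_trichotomy (2 * y0) (j + jj) with hc | hc | hc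
        · -- compare branch
          obtain ⟨x, hx⟩ := Option.isSome_iff_exists.mp (hsome y0 hy0 hle)
          obtain ⟨y, hy⟩ := Option.isSome_iff_exists.mp (hsome (j + jj - y0) (by omega) (by omega))
          have hy' : pvCell grid (i + ii - tate) (j + jj - y0) = some y := by
            rw [show i + ii - tate = tate by omega]; exact hy
          simp only [pvInnerA, hx, hy']
          rw [if_neg (by omega), if_neg (by omega),
              show PySem.List.pyRange y0 (j + PySem.Int.floordiv (jj - j + 1) 2) 1
                  = y0 :: PySem.List.pyRange (y0 + 1) (j + PySem.Int.floordiv (jj - j + 1) 2) 1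
                from PySem.List.pyRange_one_cons (by omega), List.all_cons]
          by_cases hxy : x = y
          · subst hxy
            simp [ih', hx, hy']
          · simp [hxy, hx, hy']
        · -- center: continue
          simp only [pvInnerA]
          rw [if_pos (by omega), ih',
              PySem.List.pyRange_one_eq_nil (by omega), PySem.List.pyRange_one_eq_nil (by omega)]
        · -- past the midpoint: break
          simp only [pvInnerA]
          rw [if_neg (by omega), if_pos (by omega),
              PySem.List.pyRange_one_eq_nil (by omega)]
          rfl
  exact fun y0 hy0 => main (jj + 1 - y0).toNat y0 hy0 rfl

-- A's outer loop is a nested 'all': full rows up to the middle, half of the middle row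
theorem pvOuterA_eq_all (grid : List (List String)) (i j ii jj : Int)
    (hh : i ≤ ii) (_hw : j ≤ jj)
    (hsome : ∀ r c, i ≤ r → r ≤ ii → j ≤ c → c ≤ jj → (pvCell grid r c).isSome = true) :
    ∀ t0, i ≤ t0 →
    pvOuterA grid i j ii jj (PySem.List.pyRange t0 (i + PySem.Int.floordiv (ii - i + 1 + 1) 2) 1)
      = (PySem.List.pyRange t0 (i + PySem.Int.floordiv (ii - i + 1 + 1) 2) 1).all
          (fun tate => (PySem.List.pyRange j
              (if 2 * tate = i + ii then j + PySem.Int.floordiv (jj - j + 1) 2 else jj + 1) 1).all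
            (fun y => decide (pvCell grid tate y = pvCell grid (i + ii - tate) (j + jj - y)))) := by
  have hq := pvHalf (ii - i + 1 + 1)
  have main : ∀ n : Nat, ∀ t0 : Int, i ≤ t0 →
      (i + PySem.Int.floordiv (ii - i + 1 + 1) 2 - t0).toNat = n →
      pvOuterA grid i j ii jj (PySem.List.pyRange t0 (i + PySem.Int.floordiv (ii - i + 1 + 1) 2) 1)
        = (PySem.List.pyRange t0 (i + PySem.Int.floordiv (ii - i + 1 + 1) 2) 1).all
            (fun tate => (PySem.List.pyRange j
                (if 2 * tate = i + ii then j + PySem.Int.floordiv (jj - j + 1) 2 else jj + 1) 1).all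
              (fun y => decide (pvCell grid tate y = pvCell grid (i + ii - tate) (j + jj - y)))) := by
    intro n
    induction n with
    | zero =>
        intro t0 _ h0
        rw [PySem.List.pyRange_one_eq_nil (by omega)]
        rfl
    | succ n ihn =>
        intro t0 ht0 hn
        have hlt : t0 < i + PySem.Int.floordiv (ii - i + 1 + 1) 2 := by omega
        have htii : 2 * t0 ≤ i + ii := by omega
        rw [PySem.List.pyRange_one_cons (by omega), List.all_cons]
        have ih' := ihn (t0 + 1) (by omega) (by omega)
        by_cases hmi : 2 * t0 = i + ii
        · -- middle row
          have hrow := pvInnerA_mid grid i j ii jj t0 hmi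
            (fun c h1 h2 => hsome t0 c ht0 (by omega) h1 h2) j le_rfl
          simp only [pvOuterA, hrow]
          rw [if_pos hmi]
          by_cases hall : (PySem.List.pyRange j (j + PySem.Int.floordiv (jj - j + 1) 2) 1).all
              (fun y => decide (pvCell grid t0 y = pvCell grid (i + ii - t0) (j + jj - y))) = true
          · rw [if_pos hall, hall, Bool.true_and]
            exact ih'
          · simp only [Bool.not_eq_true] at hall
            rw [hall]; simp
        · -- non-middle row
          have hrow := pvInnerA_row grid i j ii jj t0 (by omega)
            (fun c h1 h2 => ⟨hsome t0 c ht0 (by omega) h1 h2,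
                             hsome (i + ii - t0) c (by omega) (by omega) h1 h2⟩) j le_rfl
          simp only [pvOuterA, hrow]
          rw [if_neg hmi]
          by_cases hall : (PySem.List.pyRange j (jj + 1) 1).all
              (fun y => decide (pvCell grid t0 y = pvCell grid (i + ii - t0) (j + jj - y))) = true
          · rw [if_pos hall, hall, Bool.true_and]
            exact ih'
          · simp only [Bool.not_eq_true] at hall
            rw [hall]; simp
  exact fun t0 ht0 => main _ t0 ht0 rfl

-- the row-major bijection between A's compared (row, column) pairs and the flat first-half indices
theorem pvAllEquiv (grid : List (List String)) (i j ii jj : Int) (hh : i ≤ ii) (hw : j ≤ jj) :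
    ((PySem.List.pyRange i (i + PySem.Int.floordiv (ii - i + 1 + 1) 2) 1).all
        (fun tate => (PySem.List.pyRange j
            (if 2 * tate = i + ii then j + PySem.Int.floordiv (jj - j + 1) 2 else jj + 1) 1).all
          (fun y => decide (pvCell grid tate y = pvCell grid (i + ii - tate) (j + jj - y)))) = true)
      ↔ (∀ k : Int, 0 ≤ k → k < PySem.Int.floordiv ((ii - i + 1) * (jj - j + 1)) 2 →
          pvCell grid (i + k / (jj - j + 1)) (j + k % (jj - j + 1))
            = pvCell grid (ii - k / (jj - j + 1)) (jj - k % (jj - j + 1))) := by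
  have hw0 : (0:Int) < jj - j + 1 := by omega
  have hq := pvHalf (ii - i + 1 + 1)
  have hm := pvHalf (jj - j + 1)
  have hM := pvHalf ((ii - i + 1) * (jj - j + 1))
  have hp : (ii - i + 1) * (jj - j + 1) = (ii - i) * (jj - j + 1) + (jj - j + 1) := by ring
  simp only [List.all_eq_true, PySem.List.mem_pyRange_one, decide_eq_true_eq]
  constructor
  · intro H k hk0 hkM
    obtain ⟨hr0, hru, hc0, hcw, hmid⟩ :=
      pvKBounds (ii - i + 1) (jj - j + 1) (PySem.Int.floordiv ((ii - i + 1) * (jj - j + 1)) 2) k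
        (by omega) (by omega) hM.1 hk0 hkM
    have e1 : i + ii - (i + k / (jj - j + 1)) = ii - k / (jj - j + 1) := by ring
    have e2 : j + jj - (j + k % (jj - j + 1)) = jj - k % (jj - j + 1) := by ring
    have H' := H (i + k / (jj - j + 1)) ⟨by omega, by omega⟩
      (j + k % (jj - j + 1)) ⟨by omega, ?side⟩
    · rw [e1, e2] at H'
      exact H'
    case side =>
      by_cases hmi : 2 * (i + k / (jj - j + 1)) = i + ii
      · rw [if_pos hmi]
        have := hmid (by omega)
        omega
      · rw [if_neg hmi]
        omega
  · intro H tate htate y hy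
    have htu : 2 * tate ≤ i + ii := by omega
    have hyj : j ≤ y := hy.1
    have hyjj : y ≤ jj := by
      rcases hy with ⟨_, hy2⟩
      by_cases hmi : 2 * tate = i + ii
      · rw [if_pos hmi] at hy2; omega
      · rw [if_neg hmi] at hy2; omega
    have hk := pvDivmodOf (jj - j + 1) (tate - i) (y - j) hw0 (by omega) (by omega)
    have hkM : (y - j) + (tate - i) * (jj - j + 1)
        < PySem.Int.floordiv ((ii - i + 1) * (jj - j + 1)) 2 := by
      have : (tate - i) * (jj - j + 1) + (y - j) < PySem.Int.floordiv ((ii - i + 1) * (jj - j + 1)) 2 := by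
        apply pvKUp (ii - i + 1) (jj - j + 1) _ (tate - i) (y - j) (by omega) (by omega)
          (by omega) (by omega) (by omega)
        by_cases hmi : 2 * tate = i + ii
        · right
          rw [if_pos hmi] at hy
          constructor
          · omega
          · omega
        · left; omega
      omega
    have hknn : (0:Int) ≤ (y - j) + (tate - i) * (jj - j + 1) := by
      have hmn := mul_nonneg (show (0:Int) ≤ tate - i by omega) (show (0:Int) ≤ jj - j + 1 by omega)
      linarith
    have H' := H ((y - j) + (tate - i) * (jj - j + 1)) hknn hkM
    rw [hk.1, hk.2] at H'
    have e1 : i + (tate - i) = tate := by ring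
    have e2 : j + (y - j) = y := by ring
    have e3 : ii - (tate - i) = i + ii - tate := by ring
    have e4 : jj - (y - j) = j + jj - y := by ring
    rw [e1, e2, e3, e4] at H'
    exact H'

-- B's comprehension, flattened: the k-th cell of the block in row-major order
theorem pvCellsChar (grid : List (List String)) (i j ii jj : Int) (hw : j ≤ jj) :
    ∀ n : Nat, ∀ t0 : Int, i ≤ t0 → (ii + 1 - t0).toNat = n →
    (PySem.List.pyRange t0 (ii + 1) 1).flatMap (fun r =>
        (PySem.List.pyRange j (jj + 1) 1).map (fun c => pvCell grid r c))
      = (PySem.List.pyRange ((t0 - i) * (jj - j + 1)) ((ii + 1 - i) * (jj - j + 1)) 1).map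
          (pvF grid i j jj) := by
  have hw0 : (0:Int) < jj - j + 1 := by omega
  intro n
  induction n with
  | zero =>
      intro t0 ht0 h0
      rw [show PySem.List.pyRange t0 (ii + 1) 1 = [] from PySem.List.pyRange_one_eq_nil (by omega),
          show PySem.List.pyRange ((t0 - i) * (jj - j + 1)) ((ii + 1 - i) * (jj - j + 1)) 1 = []
            from PySem.List.pyRange_one_eq_nil
              (mul_le_mul_of_nonneg_right (by omega : ii + 1 - i ≤ t0 - i) (by omega : (0:Int) ≤ jj - j + 1))]
      rfl
  | succ n ihn =>
      intro t0 ht0 hn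
      have hlt : t0 ≤ ii := by omega
      rw [PySem.List.pyRange_one_cons (by omega : t0 < ii + 1), List.flatMap_cons,
          ihn (t0 + 1) (by omega) (by omega),
          PySem.List.pyRange_one_append ((t0 - i) * (jj - j + 1)) ((t0 + 1 - i) * (jj - j + 1))
            ((ii + 1 - i) * (jj - j + 1))
            (by nlinarith) (by nlinarith),
          List.map_append]
      congr 1
      -- one row: map over columns = map pvF over one w-block of flat indices
      rw [PySem.List.pyRange_one j (jj + 1), PySem.List.pyRange_one ((t0 - i) * (jj - j + 1))
            ((t0 + 1 - i) * (jj - j + 1)),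
          show (t0 + 1 - i) * (jj - j + 1) - (t0 - i) * (jj - j + 1) = jj + 1 - j from by ring,
          List.map_map, List.map_map]
      apply List.map_congr_left
      intro a ha
      have haw : (a : Int) < jj - j + 1 := by
        have := List.mem_range.mp ha
        omega
      have hdm := pvDivmodOf (jj - j + 1) (t0 - i) (a : Int) hw0 (by positivity) haw
      simp only [Function.comp_apply, pvF]
      rw [show (t0 - i) * (jj - j + 1) + (a : Int) = (a : Int) + (t0 - i) * (jj - j + 1) by ring,
          hdm.1, hdm.2, show i + (t0 - i) = t0 by ring]

-- a list equals its reversal iff each element equals its mirror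
theorem pvPalin {α : Type} (l : List α) :
    l = l.reverse ↔ ∀ (n : Nat) (hn : n < l.length), l[n] = l[l.length - 1 - n] := by
  constructor
  · intro e n hn
    have h2 : l.reverse[n]? = l[l.length - 1 - n]? := by
      rw [List.getElem?_reverse hn]
    rw [← e, List.getElem?_eq_getElem hn, List.getElem?_eq_getElem (by omega)] at h2
    exact Option.some.inj h2
  · intro H
    apply List.ext_getElem (by simp)
    intro n h1 h2
    rw [List.getElem_reverse]
    exact H n (by simpa using h2)
-- the half comparison of flat indices is exactly 'the cell list is a palindrome'
theorem pvHalfPalin (grid : List (List String)) (i j ii jj : Int) (hh : i ≤ ii) (hw : j ≤ jj) :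
    (∀ k : Int, 0 ≤ k → k < PySem.Int.floordiv ((ii - i + 1) * (jj - j + 1)) 2 →
        pvCell grid (i + k / (jj - j + 1)) (j + k % (jj - j + 1))
          = pvCell grid (ii - k / (jj - j + 1)) (jj - k % (jj - j + 1)))
      ↔ (∀ k : Int, 0 ≤ k → k < (ii - i + 1) * (jj - j + 1) →
          pvF grid i j jj k = pvF grid i j jj ((ii - i + 1) * (jj - j + 1) - 1 - k)) := by
  have hw0 : (0:Int) < jj - j + 1 := by omega
  have hM := pvHalf ((ii - i + 1) * (jj - j + 1))
  have hM0 : 0 ≤ PySem.Int.floordiv ((ii - i + 1) * (jj - j + 1)) 2 := by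
    have : (0:Int) < (ii - i + 1) * (jj - j + 1) := mul_pos (by omega) (by omega)
    omega
  -- mirror identity: pvF at the mirrored index is the mirrored cell
  have mir : ∀ k : Int, 0 ≤ k → k < (ii - i + 1) * (jj - j + 1) →
      pvF grid i j jj ((ii - i + 1) * (jj - j + 1) - 1 - k)
        = pvCell grid (ii - k / (jj - j + 1)) (jj - k % (jj - j + 1)) := by
    intro k hk0 hkN
    have hd := Int.mul_ediv_add_emod k (jj - j + 1)
    have hc0 := Int.emod_nonneg k (by omega : jj - j + 1 ≠ 0)
    have hcw := Int.emod_lt_of_pos k hw0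
    have hq0 : 0 ≤ k / (jj - j + 1) := Int.ediv_nonneg hk0 (by omega)
    have hqh : k / (jj - j + 1) < ii - i + 1 := by
      rw [Int.ediv_lt_iff_lt_mul hw0]
      linarith
    have hsplit : (ii - i + 1) * (jj - j + 1) - 1 - k
        = (jj - j + 1 - 1 - k % (jj - j + 1))
          + (ii - i + 1 - 1 - k / (jj - j + 1)) * (jj - j + 1) := by linear_combination hd
    have hdm := pvDivmodOf (jj - j + 1) (ii - i + 1 - 1 - k / (jj - j + 1))
      (jj - j + 1 - 1 - k % (jj - j + 1)) hw0 (by omega) (by omega)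
    unfold pvF
    rw [hsplit, hdm.1, hdm.2,
        show i + (ii - i + 1 - 1 - k / (jj - j + 1)) = ii - k / (jj - j + 1) by ring,
        show j + (jj - j + 1 - 1 - k % (jj - j + 1)) = jj - k % (jj - j + 1) by ring]
  constructor
  · intro H k hk0 hkN
    by_cases hkM : k < PySem.Int.floordiv ((ii - i + 1) * (jj - j + 1)) 2
    · rw [mir k hk0 hkN]
      exact H k hk0 hkM
    · set N := (ii - i + 1) * (jj - j + 1) with hN
      by_cases hc : N - 1 - k = k
      · rw [hc]
      · have hk' : N - 1 - k < PySem.Int.floordiv N 2 := by omega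
        have Hk' := H (N - 1 - k) (by omega) hk'
        have e2 : pvF grid i j jj k
            = pvCell grid (ii - (N - 1 - k) / (jj - j + 1)) (jj - (N - 1 - k) % (jj - j + 1)) := by
          have hmir := mir (N - 1 - k) (by omega) (by omega)
          rwa [show N - 1 - (N - 1 - k) = k by ring] at hmir
        rw [e2, ← Hk']
        rfl
  · intro H k hk0 hkM
    rw [← mir k hk0 (by omega)]
    exact H k hk0 (by omega)

-- check_alt computes 'cells equals its reversal'
theorem pvAltEq (grid : List (List String)) (i j ii jj : Int) :
    check_alt grid i j ii jj
      = decide (pvCells grid i j ii jj = (pvCells grid i j ii jj).reverse) := by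
  show (pvCells grid i j ii jj
      == (PySem.List.slice? (pvCells grid i j ii jj) none none (-1)).getD []) = _
  rw [PySem.List.slice?_none_none_neg_one, Option.getD_some]
  apply Bool.eq_iff_iff.mpr
  rw [beq_iff_eq, decide_eq_true_eq]

-- ===== VERDICT (by name: the statement is the Claim_ definition above) =====
theorem check_spec : Claim_equal_check := by
  intro grid i j ii jj _hdom hpre
  unfold Spec_check
  show pvOuterA grid i j ii jj _ = _
  rw [pvAltEq]
  by_cases h1 : ii - i + 1 ≤ 0
  · have hq := pvHalf (ii - i + 1 + 1)
    have hcells : pvCells grid i j ii jj = [] := by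
      unfold pvCells
      rw [show PySem.List.pyRange i (ii + 1) 1 = [] from PySem.List.pyRange_one_eq_nil (by omega)]
      rfl
    rw [PySem.List.pyRange_one_eq_nil (by omega), hcells]
    simp [pvOuterA]
  · by_cases h2 : jj - j + 1 ≤ 0
    · have hcells : pvCells grid i j ii jj = [] := by
        unfold pvCells
        rw [show PySem.List.pyRange j (jj + 1) 1 = []
              from PySem.List.pyRange_one_eq_nil (by omega)]
        simp
      rw [pvOuterA_empty_cols grid i j ii jj (by omega), hcells]
      simp
    · have hh : i ≤ ii := by omega
      have hw : j ≤ jj := by omega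
      have hw0 : (0:Int) < jj - j + 1 := by omega
      have hsome : ∀ r c, i ≤ r → r ≤ ii → j ≤ c → c ≤ jj → (pvCell grid r c).isSome = true := by
        unfold Pre_check pvPreB at hpre
        rw [if_pos ⟨hh, hw⟩] at hpre
        simp only [Bool.and_eq_true, List.all_eq_true, decide_eq_true_eq] at hpre
        obtain ⟨⟨hgi, hgii⟩, hrows⟩ := hpre
        intro r c hr1 hr2 hc1 hc2
        have hrow := hrows r ((PySem.List.mem_pyRange_one).mpr ⟨hr1, by omega⟩)
        cases hgr : PySem.List.pyGet? grid r with
        | none => rw [hgr] at hrow; exact absurd hrow (by simp)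
        | some row =>
            rw [hgr] at hrow
            simp only [Bool.and_eq_true, decide_eq_true_eq] at hrow
            have hne : PySem.List.pyGet? row c ≠ none := by
              rw [Ne, PySem.List.pyGet?_eq_none_iff]
              intro hn
              exact hn ⟨by omega, by omega⟩
            unfold pvCell
            rw [hgr]
            exact Option.isSome_iff_ne_none.mpr hne
      rw [pvOuterA_eq_all grid i j ii jj hh hw hsome i le_rfl]
      have hchar := pvCellsChar grid i j ii jj hw (ii + 1 - i).toNat i le_rfl rfl
      rw [show (i - i) * (jj - j + 1) = 0 from by ring,
          show (ii + 1 - i) * (jj - j + 1) = (ii - i + 1) * (jj - j + 1) from by ring] at hchar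
      have hcells : pvCells grid i j ii jj
          = (PySem.List.pyRange 0 ((ii - i + 1) * (jj - j + 1)) 1).map (pvF grid i j jj) := hchar
      rw [Bool.eq_iff_iff, decide_eq_true_eq,
          pvAllEquiv grid i j ii jj hh hw, pvHalfPalin grid i j ii jj hh hw, hcells, pvPalin]
      have hN0 : (0:Int) ≤ (ii - i + 1) * (jj - j + 1) := mul_nonneg (by omega) (by omega)
      have hlen : ((PySem.List.pyRange 0 ((ii - i + 1) * (jj - j + 1)) 1).map
          (pvF grid i j jj)).length = ((ii - i + 1) * (jj - j + 1)).toNat := by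
        rw [List.length_map, PySem.List.length_pyRange_one]
        congr 1
        omega
      constructor
      · -- mirror ∀ over Int → getElem ∀ over Nat
        intro H n hn
        have hn' := hn
        rw [hlen] at hn'
        have H' := H (n : Int) (by omega) (by omega)
        rw [List.getElem_map, List.getElem_map, PySem.List.getElem_pyRange_one,
            PySem.List.getElem_pyRange_one, hlen]
        simp only [zero_add]
        rwa [show ((((((ii - i + 1) * (jj - j + 1)).toNat - 1 - n : Nat)) : Int))
              = (ii - i + 1) * (jj - j + 1) - 1 - (n : Int) from by omega]
      · -- getElem ∀ over Nat → mirror ∀ over Int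
        intro H k hk0 hkN
        have hn : k.toNat < ((PySem.List.pyRange 0 ((ii - i + 1) * (jj - j + 1)) 1).map
            (pvF grid i j jj)).length := by
          rw [hlen]; omega
        have H' := H k.toNat hn
        rw [List.getElem_map, List.getElem_map, PySem.List.getElem_pyRange_one,
            PySem.List.getElem_pyRange_one, hlen] at H'
        simp only [zero_add] at H'
        rw [Int.toNat_of_nonneg hk0] at H'
        rwa [show ((((((ii - i + 1) * (jj - j + 1)).toNat - 1 - k.toNat : Nat)) : Int))
              = (ii - i + 1) * (jj - j + 1) - 1 - k from by omega] at H'
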